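-- pv_equiv track=rewrite | github.com/kush-pixel/ARIA | scripts/run_shadow_mode.py | _classify_comorbidity_concern
-- ===== SOURCE A (Python) =====
-- from typing import Any
--
-- _CARDIOVASCULAR_KEYWORDS: tuple[str, ...] = (
--     "CHF", "CAD", "ANGINA", "PVD", "PERIPHERAL VASCULAR",
--     "BYPASS SURGERY", "STROKE", "TIA", "CORONARY",
-- )
--
-- _METABOLIC_KEYWORDS: tuple[str, ...] = (
--     "DIABETES", "HYPERGLYCEMIA", "HYPOGLYCEMIA",
-- )
--
-- def _classify_comorbidity_concern(
--     other_active_problems: list[dict[str, Any]],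
-- ) -> tuple[bool, bool]:
--     """Return (cardiovascular_concern, metabolic_concern) from non-HTN problems.
--
--     A condition contributes to concern only when PROBLEM_STATUS2_FLAG is "1" or "2"
--     — the physician actively flagged it as under evaluation or urgent.
--     Flag "3" (stable/doing well) does not elevate concern.
--     """
--     cardio = False
--     metabolic = False
--     for prob in other_active_problems:
--         if prob.get("flag") not in ("1", "2"):
--             continue
--         name_upper = (prob.get("name") or "").upper()
--         if any(kw in name_upper for kw in _CARDIOVASCULAR_KEYWORDS):
--             cardio = True
--         if any(kw in name_upper for kw in _METABOLIC_KEYWORDS):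
--             metabolic = True
--     return cardio, metabolic
-- ===== SOURCE B (Python) =====
-- from typing import Any
--
-- _CARDIOVASCULAR_KEYWORDS: tuple[str, ...] = (
--     "CHF", "CAD", "ANGINA", "PVD", "PERIPHERAL VASCULAR",
--     "BYPASS SURGERY", "STROKE", "TIA", "CORONARY",
-- )
--
-- _METABOLIC_KEYWORDS: tuple[str, ...] = (
--     "DIABETES", "HYPERGLYCEMIA", "HYPOGLYCEMIA",
-- )
--
-- def _classify_comorbidity_concern(
--     other_active_problems: list[dict[str, Any]],
-- ) -> tuple[bool, bool]:
--     # Build ONE newline-joined corpus of the flagged, uppercased names and run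
--     # each keyword once over that single haystack.  Correct because no keyword
--     # contains "\n", so a keyword occurs in the corpus iff it occurs in some
--     # individual flagged name.
--     corpus = "\n".join(
--         (prob.get("name") or "").upper()
--         for prob in other_active_problems
--         if prob.get("flag") in ("1", "2")
--     )
--     return (
--         any(kw in corpus for kw in _CARDIOVASCULAR_KEYWORDS),
--         any(kw in corpus for kw in _METABOLIC_KEYWORDS),
--     )
-- ===== Notes on version B (the rewrite author's own statement) =====
-- stated objective: alternative
-- what changed: Instead of scanning each problem and accumulating two flags, B concatenates all flagged uppercased names into one newline-separated corpus string and runs each keyword family once over that single haystack (sound because no keyword contains a newline).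
import Mathlib
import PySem

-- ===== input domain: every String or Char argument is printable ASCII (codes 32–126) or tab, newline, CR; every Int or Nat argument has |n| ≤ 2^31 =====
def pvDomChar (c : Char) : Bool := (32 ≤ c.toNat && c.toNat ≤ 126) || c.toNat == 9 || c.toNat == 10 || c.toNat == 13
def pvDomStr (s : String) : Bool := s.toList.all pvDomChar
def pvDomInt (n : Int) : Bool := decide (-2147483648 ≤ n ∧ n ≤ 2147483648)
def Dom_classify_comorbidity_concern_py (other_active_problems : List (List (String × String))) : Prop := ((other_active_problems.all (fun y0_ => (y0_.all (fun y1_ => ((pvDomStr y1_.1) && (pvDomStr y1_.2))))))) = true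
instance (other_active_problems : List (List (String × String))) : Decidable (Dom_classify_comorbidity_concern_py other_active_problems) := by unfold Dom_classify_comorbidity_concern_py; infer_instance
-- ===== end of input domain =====

-- B replaces A's per-problem accumulating pass with one newline-joined corpus of the
-- flagged uppercased names, scanned once per keyword family (objective: alternative).

-- ===== PORT A =====
def pvCardioKw : List String :=
  ["CHF", "CAD", "ANGINA", "PVD", "PERIPHERAL VASCULAR",
   "BYPASS SURGERY", "STROKE", "TIA", "CORONARY"]

def pvMetabolicKw : List String :=
  ["DIABETES", "HYPERGLYCEMIA", "HYPOGLYCEMIA"]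

def classify_comorbidity_concern_py (other_active_problems : List (List (String × String))) : Bool × Bool :=
  other_active_problems.foldl
    (fun (st : Bool × Bool) prob =>
      let flag := (PySem.Dict.mk prob).get? "flag"
      if ¬ (flag = some "1" ∨ flag = some "2") then st
      else
        let nameUpper := PySem.Str.upper (((PySem.Dict.mk prob).get? "name").getD "")
        let cardio := if pvCardioKw.any (fun kw => PySem.Str.isIn kw nameUpper) then true else st.1
        let metabolic := if pvMetabolicKw.any (fun kw => PySem.Str.isIn kw nameUpper) then true else st.2
        (cardio, metabolic))
    (false, false)

-- ===== PORT B =====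
def classify_comorbidity_concern_py_alt (other_active_problems : List (List (String × String))) : Bool × Bool :=
  let corpus := PySem.Str.join "\n"
      ((other_active_problems.filter
          (fun prob =>
            let f := (PySem.Dict.mk prob).get? "flag"
            f == some "1" || f == some "2")).map
        (fun prob => PySem.Str.upper (((PySem.Dict.mk prob).get? "name").getD "")))
  (pvCardioKw.any (fun kw => PySem.Str.isIn kw corpus),
   pvMetabolicKw.any (fun kw => PySem.Str.isIn kw corpus))

-- ===== PRECONDITION & SPEC =====
def Spec_classify_comorbidity_concern_py (other_active_problems : List (List (String × String))) (out : Bool × Bool) : Prop := out = classify_comorbidity_concern_py_alt other_active_problems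
instance (other_active_problems : List (List (String × String))) (out : Bool × Bool) : Decidable (Spec_classify_comorbidity_concern_py other_active_problems out) := by unfold Spec_classify_comorbidity_concern_py; infer_instance

-- ===== CLAIM =====
def Claim_equal_classify_comorbidity_concern_py : Prop := ∀ (other_active_problems : List (List (String × String))), Dom_classify_comorbidity_concern_py other_active_problems → Spec_classify_comorbidity_concern_py other_active_problems (classify_comorbidity_concern_py other_active_problems)

-- ===== LEMMAS AND PROOFS =====

-- A prefix of L ++ c :: b avoiding c is a prefix of L.
theorem pvPrefix_split {p L b : List Char} {c : Char}
    (h : p <+: L ++ c :: b) (hc : c ∉ p) : p <+: L := by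
  by_cases hl : p.length ≤ L.length
  · exact List.prefix_of_prefix_length_le h (L.prefix_append _) hl
  · exfalso
    rw [not_le] at hl
    obtain ⟨t, ht⟩ := h
    have h1 : (p ++ t)[L.length]? = some c := by
      rw [ht, List.getElem?_append_right le_rfl]
      simp
    rw [List.getElem?_append_left hl] at h1
    exact hc (List.mem_of_getElem? h1)

-- An infix of L ++ c :: b avoiding c lies inside L or inside b.
theorem pvInfix_append_cons {p : List Char} {c : Char} (hc : c ∉ p) :
    ∀ L b : List Char, p <:+: L ++ c :: b ↔ (p <:+: L ∨ p <:+: b) := by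
  intro L b
  constructor
  · induction L with
    | nil =>
      intro h
      rcases (List.infix_cons_iff).1 h with h | h
      · rcases p with _ | ⟨x, p'⟩
        · exact Or.inl List.nil_infix
        · exfalso
          obtain ⟨t, ht⟩ := h
          simp at ht
          exact hc (by simp [ht.1])
      · exact Or.inr h
    | cons x L' ih =>
      intro h
      rcases (List.infix_cons_iff).1 h with h | h
      · exact Or.inl (pvPrefix_split h hc).isInfix
      · rcases ih h with h | h
        · exact Or.inl (h.trans ⟨[x], [], by simp⟩)
        · exact Or.inr h
  · rintro (h | h)
    · exact h.trans ⟨[], c :: b, by simp⟩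
    · exact h.trans ⟨L ++ [c], [], by simp⟩

-- Infix of a [c]-joined list, for nonempty p avoiding c, means infix of some part.
theorem pvInfix_join {p : List Char} {c : Char} (hp : p ≠ []) (hc : c ∉ p) :
    ∀ names : List (List Char),
      (p <:+: PySem.Chars.join [c] names ↔ ∃ n ∈ names, p <:+: n) := by
  intro names
  induction names with
  | nil => simp [PySem.Chars.join_nil, hp]
  | cons n rest ih =>
    cases rest with
    | nil => simp [PySem.Chars.join_singleton]
    | cons m rest' =>
      rw [PySem.Chars.join_cons_cons]
      rw [List.append_assoc]
      simp only [List.singleton_append]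
      rw [pvInfix_append_cons hc, ih]
      simp

-- A keyword that is nonempty and newline-free occurs in the joined corpus
-- iff it occurs in one of the joined names.
theorem pvIsIn_join (kw : String) (hp : kw.toList ≠ []) (hc : '\n' ∉ kw.toList)
    (names : List String) :
    PySem.Str.isIn kw (PySem.Str.join "\n" names)
      = names.any (fun n => PySem.Str.isIn kw n) := by
  have hj : ("\n" : String).toList = ['\n'] := rfl
  by_cases h : kw.toList <:+: (PySem.Str.join "\n" names).toList
  · have h' := h
    rw [PySem.Str.toList_join, hj, pvInfix_join hp hc] at h'
    obtain ⟨n, hn, hinf⟩ := h'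
    obtain ⟨m, hm, rfl⟩ := List.mem_map.1 hn
    rw [(PySem.Str.isIn_iff_infix kw _).2 h, eq_comm, List.any_eq_true]
    exact ⟨m, hm, (PySem.Str.isIn_iff_infix kw m).2 hinf⟩
  · have h1 : PySem.Str.isIn kw (PySem.Str.join "\n" names) = false := by
      cases hb : PySem.Str.isIn kw (PySem.Str.join "\n" names)
      · rfl
      · exact absurd ((PySem.Str.isIn_iff_infix _ _).1 hb) h
    rw [h1, eq_comm, List.any_eq_false]
    intro n hn hb
    apply h
    rw [PySem.Str.toList_join, hj, pvInfix_join hp hc]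
    exact ⟨n.toList, List.mem_map_of_mem hn, (PySem.Str.isIn_iff_infix _ _).1 hb⟩

-- Scan the corpus once per keyword = scan each name per keyword (per family).
theorem pvAny_join (kws : List String)
    (hk : ∀ kw ∈ kws, kw.toList ≠ [] ∧ '\n' ∉ kw.toList)
    (names : List String) :
    kws.any (fun kw => PySem.Str.isIn kw (PySem.Str.join "\n" names))
      = names.any (fun n => kws.any (fun kw => PySem.Str.isIn kw n)) := by
  have key : ∀ kw ∈ kws, PySem.Str.isIn kw (PySem.Str.join "\n" names)
      = names.any (fun n => PySem.Str.isIn kw n) :=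
    fun kw hkw => pvIsIn_join kw (hk kw hkw).1 (hk kw hkw).2 names
  by_cases h : ∃ kw ∈ kws, ∃ n ∈ names, PySem.Str.isIn kw n = true
  · obtain ⟨kw, hkw, n, hn, hin⟩ := h
    have l : (kws.any fun kw => PySem.Str.isIn kw (PySem.Str.join "\n" names)) = true := by
      rw [List.any_eq_true]
      exact ⟨kw, hkw, by rw [key kw hkw, List.any_eq_true]; exact ⟨n, hn, hin⟩⟩
    have r : (names.any fun n => kws.any fun kw => PySem.Str.isIn kw n) = true := by
      rw [List.any_eq_true]
      exact ⟨n, hn, by rw [List.any_eq_true]; exact ⟨kw, hkw, hin⟩⟩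
    rw [l, r]
  · have l : (kws.any fun kw => PySem.Str.isIn kw (PySem.Str.join "\n" names)) = false := by
      rw [List.any_eq_false]
      intro kw hkw hb
      rw [key kw hkw, List.any_eq_true] at hb
      obtain ⟨n, hn, hin⟩ := hb
      exact h ⟨kw, hkw, n, hn, hin⟩
    have r : (names.any fun n => kws.any fun kw => PySem.Str.isIn kw n) = false := by
      rw [List.any_eq_false]
      intro n hn hb
      rw [List.any_eq_true] at hb
      obtain ⟨kw, hkw, hin⟩ := hb
      exact h ⟨kw, hkw, n, hn, hin⟩
    rw [l, r]

-- A's fold from an arbitrary accumulator, expressed as per-name any-scans.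
theorem pvFold_eq (probs : List (List (String × String))) (c m : Bool) :
    probs.foldl
      (fun (st : Bool × Bool) prob =>
        let flag := (PySem.Dict.mk prob).get? "flag"
        if ¬ (flag = some "1" ∨ flag = some "2") then st
        else
          let nameUpper := PySem.Str.upper (((PySem.Dict.mk prob).get? "name").getD "")
          let cardio := if pvCardioKw.any (fun kw => PySem.Str.isIn kw nameUpper) then true else st.1
          let metabolic := if pvMetabolicKw.any (fun kw => PySem.Str.isIn kw nameUpper) then true else st.2
          (cardio, metabolic))
      (c, m)
    = (let names := (probs.filter
          (fun prob =>
            let f := (PySem.Dict.mk prob).get? "flag"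
            f == some "1" || f == some "2")).map
          (fun prob => PySem.Str.upper (((PySem.Dict.mk prob).get? "name").getD ""))
       (c || names.any (fun n => pvCardioKw.any (fun kw => PySem.Str.isIn kw n)),
        m || names.any (fun n => pvMetabolicKw.any (fun kw => PySem.Str.isIn kw n)))) := by
  induction probs generalizing c m with
  | nil => simp
  | cons p rest ih =>
    by_cases hf : (PySem.Dict.mk p).get? "flag" = some "1" ∨ (PySem.Dict.mk p).get? "flag" = some "2"
    · have hf' : ((PySem.Dict.mk p).get? "flag" == some "1" || (PySem.Dict.mk p).get? "flag" == some "2") = true := by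
        rcases hf with h | h <;> simp [h]
      simp only [List.foldl_cons, List.filter_cons, hf', if_true, List.map_cons, List.any_cons]
      rw [if_neg (not_not_intro hf)]
      rw [ih]
      cases hc : pvCardioKw.any (fun kw => PySem.Str.isIn kw (PySem.Str.upper (((PySem.Dict.mk p).get? "name").getD ""))) <;>
      cases hm : pvMetabolicKw.any (fun kw => PySem.Str.isIn kw (PySem.Str.upper (((PySem.Dict.mk p).get? "name").getD ""))) <;>
        simp
    · have hf' : ((PySem.Dict.mk p).get? "flag" == some "1" || (PySem.Dict.mk p).get? "flag" == some "2") = false := by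
        simp only [Bool.or_eq_false_iff, beq_eq_false_iff_ne, ne_eq]
        exact ⟨fun h => hf (Or.inl h), fun h => hf (Or.inr h)⟩
      simp only [List.foldl_cons, List.filter_cons, hf', if_pos hf, Bool.false_eq_true, if_false]
      exact ih c m

-- ===== VERDICT =====
theorem classify_comorbidity_concern_py_spec : Claim_equal_classify_comorbidity_concern_py := by
  intro probs _
  show _ = _
  unfold classify_comorbidity_concern_py classify_comorbidity_concern_py_alt
  rw [pvFold_eq]
  simp only [Bool.false_or]
  rw [Prod.mk.injEq]
  exact ⟨(pvAny_join pvCardioKw (by decide) _).symm, (pvAny_join pvMetabolicKw (by decide) _).symm⟩
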